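-- pv_equiv track=rewrite | github.com/svortega/steelpy | steelpy/ufo/load/process/operations.py | get_value_point
-- ===== SOURCE A (Python) =====
-- def get_value_point(data, label:str, steps:int):
--     """ """
--     new_data = []
--     for x in range(steps):
--         try:
--             new_data.append(data[label][x])
--         except IndexError:
--             new_data.append(0)
--     return new_data
-- ===== SOURCE B (Python) =====
-- def get_value_point(data, label: str, steps: int):
--     """Slice the prefix and pad with zeros in one step."""
--     n = max(steps, 0)
--     seq = list(data.get(label, ())[:n])
--     return seq + [0] * (n - len(seq))
-- ===== Notes on version B (the rewrite author's own statement) =====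
-- stated objective: simpler
-- what changed: Replaces A's index-by-index loop with per-element try/except IndexError by a single clamped slice of the prefix plus a computed zero pad.
import Mathlib
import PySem

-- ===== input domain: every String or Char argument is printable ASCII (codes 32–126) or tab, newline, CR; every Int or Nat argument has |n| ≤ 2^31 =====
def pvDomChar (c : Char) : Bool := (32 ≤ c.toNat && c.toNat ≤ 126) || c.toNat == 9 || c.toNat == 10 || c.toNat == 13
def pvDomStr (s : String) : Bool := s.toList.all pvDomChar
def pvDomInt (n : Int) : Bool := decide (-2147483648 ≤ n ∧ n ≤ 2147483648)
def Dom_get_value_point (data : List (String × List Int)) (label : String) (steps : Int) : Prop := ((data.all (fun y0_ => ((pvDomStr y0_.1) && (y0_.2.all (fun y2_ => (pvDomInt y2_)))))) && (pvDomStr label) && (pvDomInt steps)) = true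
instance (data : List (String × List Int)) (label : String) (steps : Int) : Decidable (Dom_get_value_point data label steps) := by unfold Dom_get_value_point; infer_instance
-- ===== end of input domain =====

-- B replaces A's per-index loop with try/except by one clamped slice plus a zero pad (simpler; same cost).


-- ===== PORT A =====
-- for x in range(steps): new_data.append(data[label][x]) with except IndexError: append 0.
-- data[label] is ported as ((Dict.mk data).get? label).getD []; the getD [] default is never
-- reached under Pre_ (label present whenever the loop runs), it only keeps the port total.
def get_value_point (data : List (String × List Int)) (label : String) (steps : Int) : List Int :=
  (PySem.List.pyRange 0 steps 1).foldl
    (fun new_data x =>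
      new_data ++ [(PySem.List.pyGet? (((PySem.Dict.mk data).get? label).getD []) x).getD 0]) []

-- ===== PORT B =====
-- n = max(steps, 0); seq = list(data.get(label, ())[:n]); return seq + [0] * (n - len(seq))
def get_value_point_alt (data : List (String × List Int)) (label : String) (steps : Int) : List Int :=
  let n : Int := max steps 0
  let seq : List Int := PySem.List.slice (((PySem.Dict.mk data).get? label).getD []) none (some n)
  seq ++ List.replicate (n - seq.length).toNat 0

-- ===== PRECONDITION & SPEC =====
-- Pre_ excludes exactly the inputs where A raises KeyError: steps > 0 with label absent from data.
def Pre_get_value_point (data : List (String × List Int)) (label : String) (steps : Int) : Prop :=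
  steps ≤ 0 ∨ data.any (fun p => p.1 == label) = true
instance (data : List (String × List Int)) (label : String) (steps : Int) : Decidable (Pre_get_value_point data label steps) := by unfold Pre_get_value_point; infer_instance

def pvWitness_get_value_point : (List (String × List Int)) × String × Int :=
  ([("a", [1, 2]), ("b", [])], "a", 4)

def Spec_get_value_point (data : List (String × List Int)) (label : String) (steps : Int) (out : List Int) : Prop := out = get_value_point_alt data label steps
instance (data : List (String × List Int)) (label : String) (steps : Int) (out : List Int) : Decidable (Spec_get_value_point data label steps out) := by unfold Spec_get_value_point; infer_instance

-- ===== CLAIM (what is proved, stated in full; the proofs are below) =====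
def Claim_equal_get_value_point : Prop := ∀ (data : List (String × List Int)) (label : String) (steps : Int), Dom_get_value_point data label steps → Pre_get_value_point data label steps → Spec_get_value_point data label steps (get_value_point data label steps)


-- ===== LEMMAS AND PROOFS =====

-- A's loop over range(n) produces the n-prefix of lst padded with zeros.
theorem map_getD_range (lst : List Int) (n : Nat) :
    (List.range n).map (fun k => lst.getD k 0) =
      lst.take n ++ List.replicate (n - lst.length) 0 := by
  induction n with
  | zero => simp
  | succ m ih =>
    rw [List.range_succ, List.map_append, ih, List.map_singleton]
    by_cases h : m < lst.length
    · have h1 : m - lst.length = 0 := by omega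
      have h2 : m + 1 - lst.length = 0 := by omega
      have h3 : lst.getD m 0 = lst[m] := List.getD_eq_getElem lst 0 h
      have h4 : lst.take (m+1) = lst.take m ++ [lst[m]] := by
        rw [List.take_add_one, List.getElem?_eq_getElem h]; rfl
      rw [h1, h2, h3, h4]; simp
    · have h1 : lst.take m = lst := List.take_of_length_le (by omega)
      have h2 : lst.take (m + 1) = lst := List.take_of_length_le (by omega)
      have h3 : lst.getD m 0 = 0 := List.getD_eq_default _ _ (by omega)
      rw [h1, h2, h3, List.append_assoc]
      congr 1
      rw [← List.replicate_succ' (n := m - lst.length)]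
      congr 1
      omega

theorem core_eq (lst : List Int) (steps : Int) :
    (PySem.List.pyRange 0 steps 1).foldl
        (fun new_data x => new_data ++ [(PySem.List.pyGet? lst x).getD 0]) [] =
      PySem.List.slice lst none (some (max steps 0)) ++
        List.replicate ((max steps 0 : Int) - ((PySem.List.slice lst none (some (max steps 0))).length : Int)).toNat 0 := by
  have hn : (0:Int) ≤ max steps 0 := le_max_right _ _
  rw [PySem.List.foldl_append_singleton_eq_map, List.nil_append,
      PySem.List.slice_to lst hn]
  by_cases h : steps ≤ 0
  · rw [PySem.List.pyRange_one_eq_nil h]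
    have hmax : max steps 0 = 0 := max_eq_right h
    simp [hmax]
  · have hmax : max steps 0 = steps := max_eq_left (by omega)
    rw [PySem.List.pyRange_one, hmax]
    have hm : (steps - 0).toNat = steps.toNat := by omega
    rw [hm, List.map_map]
    have key : ∀ k : Nat, (PySem.List.pyGet? lst ((0:Int) + k)).getD 0 = lst.getD k 0 := by
      intro k
      rw [zero_add]
      simp [PySem.List.pyGet?_natCast, List.getD]
    have h1 : (List.range steps.toNat).map
        ((fun x => (PySem.List.pyGet? lst x).getD 0) ∘ (fun k : Nat => (0:Int) + k)) =
        (List.range steps.toNat).map (fun k => lst.getD k 0) :=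
      List.map_congr_left (fun k _ => key k)
    rw [h1, map_getD_range]
    congr 1
    simp only [List.length_take]
    congr 1
    omega

-- ===== VERDICT (by name: the statement is the Claim_ definition above) =====
theorem get_value_point_spec : Claim_equal_get_value_point := by
  intro data label steps _ _
  unfold Spec_get_value_point get_value_point get_value_point_alt
  exact core_eq _ steps
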